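-- pv_equiv track=rewrite | github.com/EricShow/code | python_space/python_workspace/leetcode/zijie/zijie3.py | countofseats
-- ===== SOURCE A (Python) =====
-- def countofseats(n: int):
--     if n==1:
--         return 1
--     if n==2:
--         return 4
--     dp = [0]*(n+1)
--     dp[0] = 0
--     dp[1] = 1
--     dp[2] = 4
--     for i in range(3, n+1):
--         dp[i] = dp[i//2]+dp[i-i//2]+3
--     return dp[n]
-- ===== SOURCE B (Python) =====
-- def countofseats(n: int):
--     memo = {}
--
--     def f(m):
--         if m == 1:
--             return 1
--         if m == 2:
--             return 4
--         if m in memo: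
--             return memo[m]
--         r = f(m // 2) + f(m - m // 2) + 3
--         memo[m] = r
--         return r
--
--     return f(n)
-- ===== Notes on version B (the rewrite author's own statement) =====
-- stated objective: faster
-- what changed: replaces the O(n) bottom-up DP table with a memoized top-down recursion on the halving recurrence, which touches only the O(log n) distinct floor/ceil-half subproblems
-- outside the precondition, e.g. on countofseats(0): A raises IndexError, B raises RecursionError
import Mathlib
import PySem

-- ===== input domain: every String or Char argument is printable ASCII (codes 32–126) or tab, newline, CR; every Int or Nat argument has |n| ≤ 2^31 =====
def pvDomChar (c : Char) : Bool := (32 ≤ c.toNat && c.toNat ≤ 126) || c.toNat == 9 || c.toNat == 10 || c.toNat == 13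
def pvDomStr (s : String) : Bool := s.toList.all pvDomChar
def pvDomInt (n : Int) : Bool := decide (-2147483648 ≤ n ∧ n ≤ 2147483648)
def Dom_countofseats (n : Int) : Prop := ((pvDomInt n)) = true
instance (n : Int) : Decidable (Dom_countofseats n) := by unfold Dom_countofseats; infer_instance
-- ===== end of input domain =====

-- B replaces A's O(n) bottom-up DP table with a memoized top-down recursion on the
-- halving recurrence (only the O(log n) distinct floor/ceil-half subproblems are computed).

-- ===== PORT A =====
-- loop body of A's 'for i in range(3, n+1)' (kept as a named helper of the port)
def pvStepA (dp : List Int) (i : Int) : List Int :=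
  dp.set i.toNat
    (PySem.List.pyGetD dp (PySem.Int.floordiv i 2) 0 +
     PySem.List.pyGetD dp (i - PySem.Int.floordiv i 2) 0 + 3)

-- literal port of A; list writes use .set at i.toNat and reads pyGetD — exact under
-- Pre_ (1 ≤ n), where every Python index is nonnegative and in range
def countofseats (n : Int) : Int :=
  if n = 1 then 1
  else if n = 2 then 4
  else
    let dp : List Int := List.replicate (n + 1).toNat 0
    let dp := dp.set 0 0
    let dp := dp.set 1 1
    let dp := dp.set 2 4
    let dp := (PySem.List.pyRange 3 (n + 1) 1).foldl pvStepA dp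
    PySem.List.pyGetD dp n 0

-- ===== PORT B =====
-- port of Source B's inner 'f' with the memo dict threaded through; the m = 0 branch is a
-- totality guard only (the Python recursion diverges there; unreachable under Pre_)
def pvMemoF : Nat → PySem.Dict Int Int → Int × PySem.Dict Int Int
  | m, memo =>
    if m = 0 then (0, memo)
    else if m = 1 then (1, memo)
    else if m = 2 then (4, memo)
    else
      match memo.get? (m : Int) with
      | some v => (v, memo)
      | none =>
        let p := pvMemoF (m / 2) memo
        let q := pvMemoF (m - m / 2) p.2
        let r := p.1 + q.1 + 3
        (r, q.2.insert (m : Int) r)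
termination_by m => m
decreasing_by all_goals omega

-- n.toNat is exact under Pre_ (1 ≤ n)
def countofseats_alt (n : Int) : Int := (pvMemoF n.toNat PySem.Dict.empty).1

-- ===== PRECONDITION & SPEC =====
-- Pre_ excludes exactly n ≤ 0, where A raises IndexError (dp[1] = 1 on a too-short list)
def Pre_countofseats (n : Int) : Prop := 1 ≤ n
instance (n : Int) : Decidable (Pre_countofseats n) := by unfold Pre_countofseats; infer_instance
def pvWitness_countofseats : Int := (5)

def Spec_countofseats (n : Int) (out : Int) : Prop := out = countofseats_alt n
instance (n : Int) (out : Int) : Decidable (Spec_countofseats n out) := by unfold Spec_countofseats; infer_instance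

-- ===== CLAIM (what is proved, stated in full; the proofs are below) =====
def Claim_equal_countofseats : Prop := ∀ (n : Int), Dom_countofseats n → Pre_countofseats n → Spec_countofseats n (countofseats n)

-- ===== LEMMAS AND PROOFS =====

-- the mathematical recurrence both programs compute
def gSeat : Nat → Int
  | 0 => 0
  | 1 => 1
  | 2 => 4
  | m + 3 => gSeat ((m + 3) / 2) + gSeat ((m + 3) - (m + 3) / 2) + 3
termination_by m => m
decreasing_by all_goals omega

theorem gSeat_rec (m : Nat) (h : 3 ≤ m) :
    gSeat m = gSeat (m / 2) + gSeat (m - m / 2) + 3 := by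
  obtain ⟨k, rfl⟩ : ∃ k, m = k + 3 := ⟨m - 3, by omega⟩
  rw [gSeat]

-- every value cached in the memo is a gSeat value
def pvInv (memo : PySem.Dict Int Int) : Prop :=
  ∀ k v, memo.get? k = some v → v = gSeat k.toNat

theorem pvMemoF_correct (m : Nat) (memo : PySem.Dict Int Int) (hinv : pvInv memo) :
    (pvMemoF m memo).1 = gSeat m ∧ pvInv (pvMemoF m memo).2 := by
  induction m using Nat.strong_induction_on generalizing memo with
  | _ m ih =>
    rw [pvMemoF]
    by_cases h0 : m = 0
    · subst h0; simpa [gSeat] using hinv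
    by_cases h1 : m = 1
    · subst h1; simpa [gSeat] using hinv
    by_cases h2 : m = 2
    · subst h2; simpa [gSeat] using hinv
    simp only [h0, h1, h2, if_false]
    cases hmem : memo.get? (m : Int) with
    | some v =>
      have := hinv _ _ hmem
      simpa [this] using hinv
    | none =>
      obtain ⟨hp1, hp2⟩ := ih (m / 2) (by omega) memo hinv
      obtain ⟨hq1, hq2⟩ := ih (m - m / 2) (by omega) _ hp2
      refine ⟨?_, ?_⟩
      · simp only [hp1, hq1]
        exact (gSeat_rec m (by omega)).symm
      · intro k v hk
        rw [PySem.Dict.get?_insert] at hk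
        split at hk
        · rename_i hkm
          subst hkm
          simp only [Option.some.injEq] at hk
          subst hk
          simp only [hp1, hq1, Int.toNat_natCast]
          exact (gSeat_rec m (by omega)).symm
        · exact hq2 _ _ hk

-- B computes gSeat
theorem alt_eq_gSeat (n : Int) : countofseats_alt n = gSeat n.toNat := by
  have h := pvMemoF_correct n.toNat PySem.Dict.empty (by
    intro k v hk; simp [PySem.Dict.get?_empty] at hk)
  exact h.1

-- A's loop invariant: after folding range(3, 3+k) over a table that already holds
-- gSeat 0, gSeat 1, gSeat 2, entries 0..2+k hold gSeat
theorem foldA_inv (k : Nat) (dp0 : List Int)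
    (hlen : 3 + k ≤ dp0.length)
    (h0 : ∀ j : Nat, j ≤ 2 → dp0.getD j 0 = gSeat j) :
    ((PySem.List.pyRange 3 (3 + (k : Int)) 1).foldl pvStepA dp0).length = dp0.length ∧
    ∀ j : Nat, j ≤ 2 + k →
      ((PySem.List.pyRange 3 (3 + (k : Int)) 1).foldl pvStepA dp0).getD j 0 = gSeat j := by
  induction k with
  | zero =>
    rw [PySem.List.pyRange_one_eq_nil (by omega)]
    exact ⟨rfl, fun j hj => h0 j hj⟩
  | succ k ih =>
    obtain ⟨ihlen, ihval⟩ := ih (by omega)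
    have hsplit : PySem.List.pyRange 3 (3 + ((k : Int) + 1)) 1
        = PySem.List.pyRange 3 (3 + (k : Int)) 1 ++ [3 + (k : Int)] := by
      rw [show (3 : Int) + ((k : Int) + 1) = (3 + (k : Int)) + 1 by ring]
      exact PySem.List.pyRange_one_succ_right (a := 3) (b := 3 + (k : Int)) (by omega)
    push_cast
    rw [hsplit, List.foldl_append]
    set dp := (PySem.List.pyRange 3 (3 + (k : Int)) 1).foldl pvStepA dp0 with hdp
    have hread : ∀ j : Nat, j ≤ 2 + k →
        PySem.List.pyGetD dp (j : Int) 0 = gSeat j := by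
      intro j hj
      rw [PySem.List.pyGetD_natCast]
      exact ihval j hj
    have hi2 : PySem.Int.floordiv (3 + (k : Int)) 2 = (((3 + k) / 2 : Nat) : Int) := by
      rw [show (3 : Int) + (k : Int) = ((3 + k : Nat) : Int) by push_cast; ring]
      exact PySem.Int.floordiv_natCast (3 + k) 2
    have hlen' : 3 + k < dp.length := by omega
    constructor
    · simp only [List.foldl_cons, List.foldl_nil, pvStepA, List.length_set]
      exact ihlen
    · intro j hj
      simp only [List.foldl_cons, List.foldl_nil, pvStepA]
      rw [hi2]
      have hsub : (3 + (k : Int)) - (((3 + k) / 2 : Nat) : Int)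
          = (((3 + k) - (3 + k) / 2 : Nat) : Int) := by
        have : (3 + k) / 2 ≤ 3 + k := Nat.div_le_self _ _
        push_cast [this]; ring
      rw [hsub, hread ((3 + k) / 2) (by omega), hread ((3 + k) - (3 + k) / 2) (by omega)]
      have htoNat : (3 + (k : Int)).toNat = 3 + k := by omega
      rw [htoNat]
      by_cases hjk : j = 3 + k
      · subst hjk
        rw [List.getD_eq_getElem?_getD, List.getElem?_set_self (by omega)]
        simp [gSeat_rec (3 + k) (by omega)]
      · have hj' : j ≤ 2 + k := by omega
        rw [List.getD_eq_getElem?_getD, List.getElem?_set_ne (by omega),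
            ← List.getD_eq_getElem?_getD]
        exact ihval j hj'

-- A computes gSeat on Pre_
theorem a_eq_gSeat (n : Int) (hn : 1 ≤ n) : countofseats n = gSeat n.toNat := by
  unfold countofseats
  by_cases h1 : n = 1
  · subst h1; simp [gSeat]
  by_cases h2 : n = 2
  · subst h2; simp [gSeat]
  simp only [h1, h2, if_false]
  have hn3 : 3 ≤ n := by omega
  set m : Nat := n.toNat with hm
  have hmn : (m : Int) = n := by omega
  have hm3 : 3 ≤ m := by omega
  set dp0 : List Int := (((List.replicate (n + 1).toNat 0).set 0 0).set 1 1).set 2 4 with hdp0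
  have hlen0 : dp0.length = m + 1 := by
    simp [hdp0]; omega
  have h0 : ∀ j : Nat, j ≤ 2 → dp0.getD j 0 = gSeat j := by
    intro j hj
    have hlt : j < dp0.length := by omega
    interval_cases j <;>
      simp_all [List.getD_eq_getElem?_getD, gSeat]
  obtain ⟨k, hk⟩ : ∃ k, m = 3 + k := ⟨m - 3, by omega⟩
  have hrange : n + 1 = 3 + ((k + 1 : Nat) : Int) := by push_cast; omega
  rw [hrange]
  obtain ⟨hflen, hfval⟩ := foldA_inv (k + 1) dp0 (by omega) h0
  have := hfval m (by omega)
  rw [← hmn, PySem.List.pyGetD_natCast]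
  exact this

-- ===== VERDICT (by name: the statement is the Claim_ definition above) =====
theorem countofseats_spec : Claim_equal_countofseats := by
  intro n _ hpre
  unfold Spec_countofseats
  rw [a_eq_gSeat n hpre, alt_eq_gSeat]
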